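-- pv_equiv track=rewrite | github.com/pypi-data/pypi-mirror-362 | packages/k8s-helper-cli/k8s_helper_cli-0.2.1-py3-none-any.whl/k8s_helper/utils.py | format_resource_table
-- ===== SOURCE A (Python) =====
-- from typing import Dict, List, Any, Optional
--
-- def format_resource_table(resources: List[Dict[str, Any]], headers: List[str]) -> str:
--     """Format a list of resources as a table"""
--     if not resources:
--         return "No resources found"
--
--     # Calculate column widths
--     col_widths = {}
--     for header in headers:
--         col_widths[header] = len(header)
--
--     for resource in resources:
--         for header in headers:
--             value = str(resource.get(header, 'N/A'))
--             col_widths[header] = max(col_widths[header], len(value))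
--
--     # Build the table
--     header_line = " | ".join(header.ljust(col_widths[header]) for header in headers)
--     separator = "-" * len(header_line)
--
--     lines = [header_line, separator]
--
--     for resource in resources:
--         row = " | ".join(str(resource.get(header, 'N/A')).ljust(col_widths[header]) for header in headers)
--         lines.append(row)
--
--     return "\n".join(lines)
-- ===== SOURCE B (Python) =====
-- from typing import Dict, List, Any
--
--
-- def format_resource_table(resources: List[Dict[str, Any]], headers: List[str]) -> str:
--     """Format a list of resources as a table (column-major: pad each column fully, then
--     assemble the lines by reading one cell from every padded column)."""
--     if not resources:
--         return "No resources found"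
--
--     padded_cols = []
--     for h in headers:
--         col = [h] + [str(r.get(h, 'N/A')) for r in resources]
--         w = max(len(c) for c in col)
--         padded_cols.append([c.ljust(w) for c in col])
--
--     lines = [" | ".join(col[i] for col in padded_cols)
--              for i in range(len(resources) + 1)]
--     return "\n".join([lines[0], "-" * len(lines[0])] + lines[1:])
-- ===== Notes on version B (the rewrite author's own statement) =====
-- stated objective: alternative
-- what changed: B is column-major: for each header it builds the whole column (header cell plus all resource cells), computes that column's width and pads it immediately, so there is no separate width table at all; the output lines are then assembled by reading the i-th cell of every padded column, whereas A makes a row-major width-accumulation pass over a dict and a second row-major rendering pass.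
import Mathlib
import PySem

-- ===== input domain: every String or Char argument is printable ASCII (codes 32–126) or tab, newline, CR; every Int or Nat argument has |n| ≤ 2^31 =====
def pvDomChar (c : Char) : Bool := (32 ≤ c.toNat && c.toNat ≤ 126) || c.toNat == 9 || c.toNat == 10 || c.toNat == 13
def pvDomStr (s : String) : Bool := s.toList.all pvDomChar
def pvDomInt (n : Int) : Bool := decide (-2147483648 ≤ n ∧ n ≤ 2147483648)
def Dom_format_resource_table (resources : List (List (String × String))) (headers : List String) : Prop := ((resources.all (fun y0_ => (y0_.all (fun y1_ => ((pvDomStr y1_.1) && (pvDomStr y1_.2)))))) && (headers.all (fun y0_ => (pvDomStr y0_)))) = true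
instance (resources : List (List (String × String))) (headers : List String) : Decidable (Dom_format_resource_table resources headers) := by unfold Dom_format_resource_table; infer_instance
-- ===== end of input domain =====

-- B is column-major (each column is built, width-measured and padded at once; lines are read
-- off across the padded columns), replacing A's dict width pass + second row pass (objective: alternative).

-- shared primitives: Python's str.ljust (pad right with spaces) and dict.get(h, 'N/A')
def pvLjust (s : List Char) (w : Int) : List Char := s ++ List.replicate (w - s.length).toNat ' '
def pvGet (r : List (String × String)) (h : String) : String := PySem.Dict.getD (PySem.Dict.mk r) h "N/A"

-- ===== PORT A =====
def format_resource_table (resources : List (List (String × String))) (headers : List String) : String :=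
  if resources = [] then "No resources found" else
    let colWidths : PySem.Dict String Int :=
      resources.foldl (fun d r =>
          headers.foldl (fun d h =>
            d.insert h (max (d.getD h 0) (PySem.Str.len (pvGet r h)))) d)
        (headers.foldl (fun d h => d.insert h (PySem.Str.len h)) PySem.Dict.empty)
    let headerLine := PySem.Chars.join " | ".toList
      (headers.map (fun h => pvLjust h.toList (colWidths.getD h 0)))
    let separator := List.replicate headerLine.length '-'
    let lines := [headerLine, separator] ++ resources.map (fun r =>
        PySem.Chars.join " | ".toList
          (headers.map (fun h => pvLjust (pvGet r h).toList (colWidths.getD h 0))))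
    String.ofList (PySem.Chars.join "\n".toList lines)

-- ===== PORT B =====
def format_resource_table_alt (resources : List (List (String × String))) (headers : List String) : String :=
  if resources = [] then "No resources found" else
    let paddedCols := headers.map (fun h =>
      let col := h :: resources.map (fun r => pvGet r h)
      -- max(len(c) for c in col): col is nonempty, so max? is never none and getD 0 is exact
      let w := (PySem.List.max? (col.map PySem.Str.len) (fun x => x)).getD 0
      col.map (fun c => pvLjust c.toList w))
    -- col[i] for i in range(len(resources)+1): every column has that length, so getD is exact
    let lines := (List.range (resources.length + 1)).map (fun i =>
      PySem.Chars.join " | ".toList (paddedCols.map (fun col => col.getD i [])))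
    String.ofList (PySem.Chars.join "\n".toList
      ([lines.getD 0 [], List.replicate (lines.getD 0 []).length '-'] ++ lines.drop 1))

-- ===== PRECONDITION & SPEC =====
def Spec_format_resource_table (resources : List (List (String × String))) (headers : List String) (out : String) : Prop := out = format_resource_table_alt resources headers
instance (resources : List (List (String × String))) (headers : List String) (out : String) : Decidable (Spec_format_resource_table resources headers out) := by unfold Spec_format_resource_table; infer_instance

-- ===== CLAIM (what is proved, stated in full; the proofs are below) =====
def Claim_equal_format_resource_table : Prop := ∀ (resources : List (List (String × String))) (headers : List String), Dom_format_resource_table resources headers → Spec_format_resource_table resources headers (format_resource_table resources headers)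

-- ===== LEMMAS AND PROOFS =====

-- the column width of header h: max of len h and the lengths of its cells
def pvW (resources : List (List (String × String))) (h : String) : Int :=
  resources.foldl (fun m r => max m (PySem.Str.len (pvGet r h))) (PySem.Str.len h)

theorem pv_initD (hs : List String) (d : PySem.Dict String Int) (h : String) :
    (hs.foldl (fun d h => d.insert h (PySem.Str.len h)) d).getD h 0
      = if h ∈ hs then PySem.Str.len h else d.getD h 0 := by
  induction hs generalizing d with
  | nil => simp
  | cons h' hs ih =>
      simp only [List.foldl_cons, ih, PySem.Dict.getD_insert, List.mem_cons]
      by_cases hmem : h ∈ hs <;> by_cases heq : h = h' <;> simp [hmem, heq]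

theorem pv_innerD (hs : List String) (d : PySem.Dict String Int)
    (r : List (String × String)) (h : String) :
    (hs.foldl (fun d h' => d.insert h' (max (d.getD h' 0) (PySem.Str.len (pvGet r h')))) d).getD h 0
      = if h ∈ hs then max (d.getD h 0) (PySem.Str.len (pvGet r h)) else d.getD h 0 := by
  induction hs generalizing d with
  | nil => simp
  | cons h' hs ih =>
      simp only [List.foldl_cons, ih, PySem.Dict.getD_insert, List.mem_cons]
      by_cases heq : h = h'
      · subst heq
        by_cases hmem : h ∈ hs
        · simp only [hmem, or_true, if_true]
          omega
        · simp [hmem]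
      · by_cases hmem : h ∈ hs <;> simp [hmem, heq]

theorem pv_outerD (rs : List (List (String × String))) (hs : List String)
    (d : PySem.Dict String Int) (h : String) :
    ((rs.foldl (fun d r => hs.foldl
        (fun d h' => d.insert h' (max (d.getD h' 0) (PySem.Str.len (pvGet r h')))) d) d).getD h 0)
      = if h ∈ hs then
          rs.foldl (fun m r => max m (PySem.Str.len (pvGet r h))) (d.getD h 0)
        else d.getD h 0 := by
  induction rs generalizing d with
  | nil => simp
  | cons r rs ih =>
      simp only [List.foldl_cons, ih, pv_innerD]
      by_cases hmem : h ∈ hs <;> simp [hmem]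

-- A's final dict agrees with pvW on every header
theorem pv_colWidths_eq (resources : List (List (String × String))) (headers : List String)
    (h : String) (hmem : h ∈ headers) :
    ((resources.foldl (fun d r =>
        headers.foldl (fun d h => d.insert h (max (d.getD h 0) (PySem.Str.len (pvGet r h)))) d)
      (headers.foldl (fun d h => d.insert h (PySem.Str.len h)) PySem.Dict.empty)).getD h 0)
      = pvW resources h := by
  rw [pv_outerD, if_pos hmem, pv_initD, if_pos hmem, pvW]

-- B's per-column max equals pvW
theorem pv_colmax_eq (rs : List (List (String × String))) (h : String) :
    (PySem.List.max? ((h :: rs.map (fun r => pvGet r h)).map PySem.Str.len) (fun x => x)).getD 0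
      = pvW rs h := by
  simp only [List.map_cons, PySem.List.max?_id_cons, Option.getD_some, pvW, List.foldl_map]

-- B's padded column, unfolded
theorem pv_paddedCol (rs : List (List (String × String))) (h : String) :
    (h :: rs.map (fun r => pvGet r h)).map
        (fun c => pvLjust c.toList ((PySem.List.max? ((h :: rs.map (fun r => pvGet r h)).map PySem.Str.len) (fun x => x)).getD 0))
      = pvLjust h.toList (pvW rs h)
        :: rs.map (fun r => pvLjust (pvGet r h).toList (pvW rs h)) := by
  rw [pv_colmax_eq]
  simp [List.map_map, Function.comp_def]

theorem format_resource_table_eq (resources : List (List (String × String)))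
    (headers : List String) :
    format_resource_table resources headers = format_resource_table_alt resources headers := by
  unfold format_resource_table format_resource_table_alt
  by_cases hres : resources = []
  · simp [hres]
  · simp only [if_neg hres]
    -- rewrite B's padded columns to the explicit cons form
    have hcols : headers.map (fun h =>
        (h :: resources.map (fun r => pvGet r h)).map
          (fun c => pvLjust c.toList ((PySem.List.max? ((h :: resources.map (fun r => pvGet r h)).map PySem.Str.len) (fun x => x)).getD 0)))
        = headers.map (fun h => pvLjust h.toList (pvW resources h)
            :: resources.map (fun r => pvLjust (pvGet r h).toList (pvW resources h))) := by
      exact List.map_congr_left (fun h _ => pv_paddedCol resources h)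
    rw [hcols]
    -- B's lines: split range (n+1) into 0 and successors
    rw [List.range_succ_eq_map, List.map_cons, List.map_map]
    simp only [Function.comp_def, List.getD_cons_zero, List.getD_cons_succ,
      List.drop_succ_cons, List.drop_zero, List.map_map]
    -- header line: A's widths are pvW on members
    have hhdr : headers.map (fun h => pvLjust h.toList
        (((resources.foldl (fun d r => headers.foldl
            (fun d h => d.insert h (max (d.getD h 0) (PySem.Str.len (pvGet r h)))) d)
          (headers.foldl (fun d h => d.insert h (PySem.Str.len h)) PySem.Dict.empty)).getD h 0)))
        = headers.map (fun h => pvLjust h.toList (pvW resources h)) := by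
      exact List.map_congr_left fun h hmem => by rw [pv_colWidths_eq resources headers h hmem]
    rw [hhdr]
    -- data rows: index map over range equals map over resources
    have hrows : (List.range resources.length).map (fun i =>
        PySem.Chars.join " | ".toList (headers.map (fun h =>
          (resources.map (fun r => pvLjust (pvGet r h).toList (pvW resources h))).getD i [])))
        = resources.map (fun r => PySem.Chars.join " | ".toList
            (headers.map (fun h => pvLjust (pvGet r h).toList (pvW resources h)))) := by
      apply List.ext_getElem
      · simp
      · intro i h1 h2
        simp only [List.getElem_map, List.getElem_range]
        have hi : i < resources.length := by simpa using h2
        congr 1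
        exact List.map_congr_left fun h _ => by
          simp [List.getD_eq_getElem?_getD, List.getElem?_map, List.getElem?_eq_getElem hi]
    rw [hrows]
    -- A's row widths are pvW on members
    congr 1
    have hcw : resources.map (fun r => PySem.Chars.join " | ".toList
          (headers.map (fun h => pvLjust (pvGet r h).toList
            ((resources.foldl (fun d r => headers.foldl
                (fun d h => d.insert h (max (d.getD h 0) (PySem.Str.len (pvGet r h)))) d)
              (headers.foldl (fun d h => d.insert h (PySem.Str.len h)) PySem.Dict.empty)).getD h 0))))
        = resources.map (fun r => PySem.Chars.join " | ".toList
            (headers.map (fun h => pvLjust (pvGet r h).toList (pvW resources h)))) :=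
      List.map_congr_left fun r _ =>
        congrArg _ (List.map_congr_left fun h hmem => by rw [pv_colWidths_eq resources headers h hmem])
    simp only [List.cons_append, List.nil_append, hcw]

-- ===== VERDICT (by name: the statement is the Claim_ definition above) =====
theorem format_resource_table_spec : Claim_equal_format_resource_table := by
  intro resources headers _
  unfold Spec_format_resource_table
  exact format_resource_table_eq resources headers
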